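-- pv_equiv track=rewrite | github.com/EngBioNUS/BMSS2 | BMSS/models/model_checker.py | illegal_equal
-- ===== SOURCE A (Python) =====
-- def illegal_equal(x):
--     S = x.split('==')
--     if S[0] == '' or S[-1]=='':
--         return True
--
--     for i in range(len(S)):
--         s = S[i].split('=')
--
--         if len(s) > 1:
--             return True
--     return False
-- ===== SOURCE B (Python) =====
-- def illegal_equal(x):
--     # One left-to-right scan over the characters: an equals-sign usage is illegal iff the
--     # expression is empty, or some maximal run of equals signs starts the string, ends the
--     # string, or has odd length (is not a clean interior chain of comparison operators).
--     if x == '':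
--         return True
--     n = len(x)
--     i = 0
--     while i < n:
--         if x[i] == '=':
--             j = i
--             while j < n and x[j] == '=':
--                 j += 1
--             if i == 0 or j == n or (j - i) % 2 == 1:
--                 return True
--             i = j
--         else:
--             i += 1
--     return False
-- ===== Notes on version B (the rewrite author's own statement) =====
-- stated objective: alternative
-- what changed: Replaces the split-on-double-equals pass plus a per-chunk split-on-single-equals pass by one left-to-right scan over maximal runs of the equals character (illegal iff a run touches the start or end of the string or has odd length, or the string is empty).
import Mathlib
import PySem

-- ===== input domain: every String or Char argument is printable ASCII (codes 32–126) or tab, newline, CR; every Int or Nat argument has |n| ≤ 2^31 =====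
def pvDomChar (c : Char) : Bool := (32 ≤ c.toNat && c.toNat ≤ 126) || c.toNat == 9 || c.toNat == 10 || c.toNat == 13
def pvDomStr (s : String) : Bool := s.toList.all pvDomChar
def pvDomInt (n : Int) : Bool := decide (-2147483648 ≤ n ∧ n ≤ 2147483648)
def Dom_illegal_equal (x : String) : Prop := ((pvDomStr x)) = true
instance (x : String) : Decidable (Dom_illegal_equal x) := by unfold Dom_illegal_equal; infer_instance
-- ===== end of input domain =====

-- B replaces A's two splitting passes by one scan over maximal runs of the equals
-- character; same return value, alternative decomposition (no speed claim).

-- ===== PORT A =====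
def illegal_equal (x : String) : Bool :=
  let S := PySem.Chars.splitOn x.toList ['=', '=']
  if PySem.List.pyGetD S 0 [] == ([] : List Char) || PySem.List.pyGetD S (-1) [] == ([] : List Char) then
    true
  else
    -- A's for-loop with early return True and final return False, as List.any
    S.any (fun chunk => decide (1 < (PySem.Chars.splitOn chunk ['=']).length))

-- ===== PORT B =====
-- inner `while j < n and x[j] == '='`: length of the leading run of '='
def pvRunLen : List Char → Nat
  | [] => 0
  | c :: t => if c = '=' then pvRunLen t + 1 else 0

-- outer `while i < n` loop of Source B; `first` says whether we are at index 0
def pvScan : List Char → Bool → Bool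
  | [], _ => false
  | c :: t, first =>
    if _h : c = '=' then
      if first || ((c :: t).drop (pvRunLen (c :: t))).isEmpty || pvRunLen (c :: t) % 2 = 1 then true
      else pvScan ((c :: t).drop (pvRunLen (c :: t))) false
    else pvScan t false
termination_by l _ => l.length
decreasing_by all_goals simp [pvRunLen, List.length_drop, *]

def illegal_equal_alt (x : String) : Bool :=
  if x.toList.isEmpty then true else pvScan x.toList true

-- ===== PRECONDITION & SPEC =====
def Spec_illegal_equal (x : String) (out : Bool) : Prop := out = illegal_equal_alt x
instance (x : String) (out : Bool) : Decidable (Spec_illegal_equal x out) := by unfold Spec_illegal_equal; infer_instance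

-- ===== CLAIM (what is proved, stated in full; the proofs are below) =====
def Claim_equal_illegal_equal : Prop := ∀ (x : String), Dom_illegal_equal x → Spec_illegal_equal x (illegal_equal x)

-- ===== LEMMAS AND PROOFS =====

-- A clean structural form of Python's str.split(sep) (greedy leftmost), used to reason
-- about PySem.Chars.splitOn's fueled accumulator loop.
def spGen (sep : List Char) (cur : List Char) : List Char → List (List Char)
  | [] => [cur]
  | c :: t =>
    if sep.isPrefixOf (c :: t) then cur :: spGen sep [] (t.drop (sep.length - 1))
    else spGen sep (cur ++ [c]) t
termination_by l => l.length
decreasing_by all_goals simp [List.length_drop]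

theorem go_eq (sep : List Char) (hsep : sep ≠ []) :
    ∀ (fuel : Nat) (l cur : List Char) (acc : List (List Char)), l.length < fuel →
      PySem.Chars.splitOn.go sep fuel l cur acc = acc.reverse ++ spGen sep cur.reverse l := by
  intro fuel
  induction fuel with
  | zero => intro l cur acc h; omega
  | succ f ih =>
    intro l cur acc h
    cases l with
    | nil => simp [PySem.Chars.splitOn.go, spGen]
    | cons c t =>
      rw [PySem.Chars.splitOn.go]
      by_cases hp : sep.isPrefixOf (c :: t)
      · rw [if_pos hp]
        obtain ⟨s0, s', hs⟩ : ∃ s0 s', sep = s0 :: s' := by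
          cases sep with
          | nil => exact absurd rfl hsep
          | cons a b => exact ⟨a, b, rfl⟩
        have hdrop : List.drop sep.length (c :: t) = t.drop (sep.length - 1) := by
          subst hs; simp
        rw [hdrop, ih _ _ _ (by simp at h ⊢; omega)]
        rw [spGen, if_pos hp]
        simp
      · rw [if_neg hp, ih _ _ _ (by simp at h ⊢; omega)]
        rw [spGen, if_neg hp]
        simp

theorem splitOn_eq (s sep : List Char) (hsep : sep ≠ []) :
    PySem.Chars.splitOn s sep = spGen sep [] s := by
  have := go_eq sep hsep (s.length + 1) s [] [] (by omega)
  simpa [PySem.Chars.splitOn] using this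

theorem spGen_ne_nil (sep : List Char) : ∀ (l cur : List Char), spGen sep cur l ≠ [] := by
  intro l
  induction l with
  | nil => intro cur; simp [spGen]
  | cons c t ih =>
    intro cur
    rw [spGen]
    by_cases hp : sep.isPrefixOf (c :: t)
    · simp [hp]
    · simpa [hp] using ih (cur ++ [c])

theorem spGen_head (sep : List Char) :
    ∀ (l cur : List Char), ∃ w S', spGen sep cur l = (cur ++ w) :: S' := by
  intro l
  induction l with
  | nil => intro cur; exact ⟨[], [], by simp [spGen]⟩
  | cons c t ih =>
    intro cur
    rw [spGen]
    by_cases hp : sep.isPrefixOf (c :: t)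
    · exact ⟨[], spGen sep [] (t.drop (sep.length - 1)), by simp [hp]⟩
    · obtain ⟨w, S', hw⟩ := ih (cur ++ [c])
      exact ⟨[c] ++ w, S', by simp [hp, hw]⟩

theorem spGen_eq1_len (l cur : List Char) :
    (1 < (spGen ['='] cur l).length) ↔ '=' ∈ l := by
  induction l generalizing cur with
  | nil => simp [spGen]
  | cons c t ih =>
    rw [spGen]
    by_cases hc : c = '='
    · subst hc
      have hpre : (['='] : List Char).isPrefixOf ('=' :: t) = true := by
        simp [List.isPrefixOf]
      rw [if_pos (by simp [hpre])]
      have h2 : 0 < (spGen ['='] [] t).length :=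
        List.length_pos_iff.mpr (spGen_ne_nil _ _ _)
      simp
      omega
    · have hpre : (['='] : List Char).isPrefixOf (c :: t) = false := by
        simp only [List.isPrefixOf, Bool.and_eq_false_iff, beq_eq_false_iff_ne, ne_eq]
        exact Or.inl fun h => hc h.symm
      rw [if_neg (by simp [hpre])]
      rw [ih]
      simp [Ne.symm hc]

theorem pyGetD_zero {α : Type} (a : α) (t : List α) (d : α) :
    PySem.List.pyGetD (a :: t) 0 d = a := by
  simp [PySem.List.pyGetD, PySem.List.pyGet?, PySem.List.pyIdx?]

theorem pyGetD_neg_one {α : Type} (S : List α) (d : α) (h : S ≠ []) :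
    PySem.List.pyGetD S (-1) d = S.getLastD d := by
  have hn : 0 < S.length := List.length_pos_iff.mpr h
  have hidx : S.length - 1 < S.length := by omega
  simp only [PySem.List.pyGetD, PySem.List.pyGet?, PySem.List.pyIdx?]
  rw [if_neg (by omega), if_pos (by omega)]
  have : (-(-1 : Int)).toNat = 1 := by decide
  rw [this]
  show (S[S.length - 1]?).getD d = S.getLastD d
  rw [List.getElem?_eq_getElem hidx, List.getLastD_eq_getLast?, List.getLast?_eq_getElem?,
    List.getElem?_eq_getElem hidx]

theorem pvScan_shift (v : List Char) :
    pvScan ('=' :: '=' :: v) false = if v = [] then true else pvScan v false := by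
  have hrun : pvRunLen ('=' :: '=' :: v) = pvRunLen v + 2 := by simp [pvRunLen]
  cases v with
  | nil => simp [pvScan, pvRunLen]
  | cons a w =>
    by_cases ha : a = '='
    · subst ha
      have hr : pvRunLen ('=' :: w) = pvRunLen w + 1 := by simp [pvRunLen]
      have hmod : (pvRunLen w + 1 + 2) % 2 = (pvRunLen w + 1) % 2 := by omega
      conv_lhs => rw [pvScan]
      conv_rhs => rw [pvScan]
      simp only [hrun, hr, List.drop_succ_cons, hmod]
      simp
    · rw [pvScan, pvScan]
      have hr : pvRunLen (a :: w) = 0 := by simp [pvRunLen, ha]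
      simp [hrun, hr]

theorem pvScan_nil (b : Bool) : pvScan [] b = false := by
  rw [pvScan]

theorem pvScan_cons_ne (c : Char) (t : List Char) (b : Bool) (h : c ≠ '=') :
    pvScan (c :: t) b = pvScan t false := by
  rw [pvScan]
  simp [h]

theorem pvScan_eq_nil (b : Bool) : pvScan ['='] b = true := by
  rw [pvScan]
  simp [pvRunLen]

theorem pvScan_eq_one (c : Char) (u : List Char) (hc : c ≠ '=') :
    pvScan ('=' :: c :: u) false = true := by
  rw [pvScan]
  simp [pvRunLen, hc]

theorem pvScan_eq_first (t : List Char) : pvScan ('=' :: t) true = true := by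
  rw [pvScan]
  simp

theorem getLastD_ne_nil {α : Type} (S : List α) (x y : α) (h : S ≠ []) :
    S.getLastD x = S.getLastD y := by
  rw [List.getLastD_eq_getLast?, List.getLastD_eq_getLast?]
  cases hS : S.getLast? with
  | none => exact absurd (List.getLast?_eq_none_iff.mp hS) h
  | some a => simp

theorem pre2_false_head (c : Char) (t : List Char) (hc : c ≠ '=') :
    (['=', '='] : List Char).isPrefixOf (c :: t) = false := by
  simp only [List.isPrefixOf, Bool.and_eq_false_iff, beq_eq_false_iff_ne, ne_eq]
  exact Or.inl fun h => hc h.symm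

theorem pre2_false_snd (c : Char) (u : List Char) (hc : c ≠ '=') :
    (['=', '='] : List Char).isPrefixOf ('=' :: c :: u) = false := by
  simp only [List.isPrefixOf, Bool.and_eq_false_iff, beq_eq_false_iff_ne, ne_eq]
  exact Or.inr (Or.inl fun h => hc h.symm)

theorem MM_nil (cur : List Char) (hcur : '=' ∉ cur) :
    (((spGen ['=', '='] cur []).getLastD [] == ([] : List Char)) ||
      (spGen ['=', '='] cur []).any (fun ch => decide ('=' ∈ ch)))
    = (if cur = [] ∧ ([] : List Char) = [] then true else pvScan [] false) := by
  by_cases hc : cur = [] <;> simp [spGen, hc, hcur, pvScan_nil]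

theorem MM : ∀ (n : Nat) (l cur : List Char), l.length ≤ n → '=' ∉ cur →
    (((spGen ['=', '='] cur l).getLastD [] == ([] : List Char)) ||
      (spGen ['=', '='] cur l).any (fun ch => decide ('=' ∈ ch)))
    = (if cur = [] ∧ l = [] then true else pvScan l false) := by
  intro n
  induction n with
  | zero =>
    intro l cur hl hcur
    have hln : l = [] := by cases l with | nil => rfl | cons a b => simp at hl
    subst hln
    exact MM_nil cur hcur
  | succ m ih =>
    intro l cur hl hcur
    cases l with
    | nil => exact MM_nil cur hcur
    | cons c t =>
      by_cases hc : c = '='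
      · subst hc
        cases t with
        | nil =>
          -- l = ['=']
          rw [spGen, if_neg (by simp)]
          rw [spGen]
          have : '=' ∈ cur ++ ['='] := by simp
          simp [this, pvScan_eq_nil]
        | cons c2 u =>
          by_cases hc2 : c2 = '='
          · subst hc2
            -- l = '=' :: '=' :: u
            rw [spGen, if_pos (by simp)]
            have hS : spGen ['=', '='] [] (List.drop (List.length ['=', '='] - 1) ('=' :: u))
                = spGen ['=', '='] [] u := by simp
            rw [hS]
            have hne : spGen ['=', '='] [] u ≠ [] := spGen_ne_nil _ _ _
            have hlast : (cur :: spGen ['=', '='] [] u).getLastD []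
                = (spGen ['=', '='] [] u).getLastD [] := by
              rw [List.getLastD_cons]
              exact getLastD_ne_nil _ _ _ hne
            have hih := ih u [] (by simp at hl ⊢; omega) (by simp)
            rw [List.any_cons, hlast]
            have hcd : decide ('=' ∈ cur) = false := by simp [hcur]
            rw [hcd]
            simp only [Bool.false_or]
            rw [hih, pvScan_shift]
            by_cases hu : u = [] <;> simp [hu]
          · -- l = '=' :: c2 :: u with c2 ≠ '='
            rw [spGen, if_neg (by simp [pre2_false_snd _ _ hc2])]
            obtain ⟨w, S', hw⟩ := spGen_head ['=', '='] (c2 :: u) (cur ++ ['='])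
            rw [hw]
            simp [pvScan_eq_one _ _ hc2]
      · -- c ≠ '='
        rw [spGen, if_neg (by simp [pre2_false_head _ _ hc])]
        have hih := ih t (cur ++ [c]) (by simp at hl ⊢; omega)
          (by simp [hcur]; exact fun h => hc h.symm)
        rw [hih, pvScan_cons_ne _ _ _ hc]
        simp

-- ===== VERDICT (by name: the statement is the Claim_ definition above) =====
theorem illegal_equal_spec : Claim_equal_illegal_equal := by
  unfold Claim_equal_illegal_equal Spec_illegal_equal
  intro x _
  unfold illegal_equal illegal_equal_alt
  have hsplit1 : (fun chunk => decide (1 < (PySem.Chars.splitOn chunk ['=']).length))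
      = fun chunk => decide ('=' ∈ chunk) := by
    funext ch
    rw [splitOn_eq _ _ (by simp)]
    simp [spGen_eq1_len]
  rw [splitOn_eq _ _ (show (['=', '='] : List Char) ≠ [] by simp), hsplit1]
  cases hcs : x.toList with
  | nil =>
    simp [spGen, PySem.List.pyGetD, PySem.List.pyGet?, PySem.List.pyIdx?]
  | cons c t =>
    rw [show (c :: t).isEmpty = false by simp]
    simp only [Bool.false_eq_true, if_false]
    by_cases hc : c = '='
    · subst hc
      rw [pvScan_eq_first]
      cases t with
      | nil =>
        have hS : spGen ['=', '='] [] ['='] = [['=']] := by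
          rw [spGen, if_neg (by simp), spGen]
          simp
        rw [hS, pyGetD_zero]
        simp
      | cons c2 u =>
        by_cases hc2 : c2 = '='
        · subst hc2
          have hS : spGen ['=', '='] [] ('=' :: '=' :: u) = [] :: spGen ['=', '='] [] u := by
            rw [spGen, if_pos (by simp)]
            simp
          rw [hS, pyGetD_zero]
          simp
        · have hS : spGen ['=', '='] [] ('=' :: c2 :: u) = spGen ['=', '='] ['='] (c2 :: u) := by
            rw [spGen, if_neg (by simp [pre2_false_snd _ _ hc2])]
            simp
          obtain ⟨w, S', hw⟩ := spGen_head ['=', '='] (c2 :: u) ['=']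
          rw [hS, hw]
          by_cases hcond : (PySem.List.pyGetD ((['='] ++ w) :: S') 0 [] == ([] : List Char)
              || PySem.List.pyGetD ((['='] ++ w) :: S') (-1) [] == ([] : List Char)) = true
          · rw [if_pos hcond]
          · rw [if_neg hcond]
            have hmem : '=' ∈ ['='] ++ w := by simp
            simp
    · rw [pvScan_cons_ne _ _ _ hc]
      have hS : spGen ['=', '='] [] (c :: t) = spGen ['=', '='] [c] t := by
        rw [spGen, if_neg (by simp [pre2_false_head _ _ hc])]
        simp
      obtain ⟨w, S', hw⟩ := spGen_head ['=', '='] t [c]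
      have hmm := MM t.length t [c] le_rfl (by simp; exact fun h => hc h.symm)
      rw [if_neg (by simp)] at hmm
      rw [hw] at hmm
      rw [hS, hw, pyGetD_zero, pyGetD_neg_one _ _ (by simp)]
      rw [show (([c] ++ w) == ([] : List Char)) = false by simp]
      simp only [Bool.false_or]
      rw [← hmm]
      by_cases hb : (((([c] ++ w) :: S').getLastD []) == ([] : List Char)) = true
      · rw [if_pos hb, hb]
        simp
      · rw [if_neg hb]
        rw [show (((([c] ++ w) :: S').getLastD []) == ([] : List Char)) = false from
          Bool.eq_false_iff.mpr (fun h => hb h)]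
        simp
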